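-- pv_equiv track=rewrite | github.com/jasonhotsauce/flow-gtd | flow/core/tagging.py | suggest_tags_from_vocabulary
-- ===== SOURCE A (Python) =====
-- def suggest_tags_from_vocabulary(
--     content: str,
--     existing_tags: list[str],
--     max_suggestions: int = 10,
-- ) -> list[str]:
--     """Suggest tags from existing vocabulary without using LLM.
--
--     Simple keyword matching for privacy mode when user doesn't want
--     content sent to LLM.
--
--     Args:
--         content: Content to match against.
--         existing_tags: Available tags to suggest from.
--         max_suggestions: Maximum number of suggestions.
--
--     Returns:
--         List of matching tag names from the vocabulary.
--     """
--     content_lower = content.lower()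
--     suggestions = []
--
--     for tag in existing_tags:
--         # Check if tag or its parts appear in content
--         tag_parts = tag.split("-")
--         if tag in content_lower or any(part in content_lower for part in tag_parts):
--             suggestions.append(tag)
--             if len(suggestions) >= max_suggestions:
--                 break
--
--     return suggestions
-- ===== SOURCE B (Python) =====
-- def suggest_tags_from_vocabulary(
--     content: str,
--     existing_tags: list[str],
--     max_suggestions: int = 10,
-- ) -> list[str]:
--     """Suggest tags from existing vocabulary without using LLM.
--
--     Precomputes, in one pass, the set of patterns (tags and their dash-parts)
--     that occur in the lowered content, then selects matching tags and truncates.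
--     Returns no suggestions when max_suggestions <= 0 (A returns one there).
--     """
--     if max_suggestions <= 0:
--         return []
--     content_lower = content.lower()
--     hits = {p for tag in existing_tags
--               for p in [tag, *tag.split("-")]
--               if p in content_lower}
--     matched = [tag for tag in existing_tags
--                if tag in hits or any(part in hits for part in tag.split("-"))]
--     return matched[:max_suggestions]
-- ===== Notes on version B (the rewrite author's own statement) =====
-- stated objective: alternative
-- what changed: B first builds, in one pass over the vocabulary, the set of patterns (tags and their dash-split parts) that occur in the lowered content, then selects matching tags by set lookup and truncates with a slice, instead of A's single loop that substring-scans per tag and breaks after appending.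
-- intended difference: When max_suggestions <= 0 and some tag matches the content, A still returns the first matching tag (its bound is checked only after appending), while B returns [], which is the intended meaning of asking for at most zero suggestions. — e.g. on suggest_tags_from_vocabulary("cat", ["cat"], 0): A returns ["cat"], B returns []
import Mathlib
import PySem

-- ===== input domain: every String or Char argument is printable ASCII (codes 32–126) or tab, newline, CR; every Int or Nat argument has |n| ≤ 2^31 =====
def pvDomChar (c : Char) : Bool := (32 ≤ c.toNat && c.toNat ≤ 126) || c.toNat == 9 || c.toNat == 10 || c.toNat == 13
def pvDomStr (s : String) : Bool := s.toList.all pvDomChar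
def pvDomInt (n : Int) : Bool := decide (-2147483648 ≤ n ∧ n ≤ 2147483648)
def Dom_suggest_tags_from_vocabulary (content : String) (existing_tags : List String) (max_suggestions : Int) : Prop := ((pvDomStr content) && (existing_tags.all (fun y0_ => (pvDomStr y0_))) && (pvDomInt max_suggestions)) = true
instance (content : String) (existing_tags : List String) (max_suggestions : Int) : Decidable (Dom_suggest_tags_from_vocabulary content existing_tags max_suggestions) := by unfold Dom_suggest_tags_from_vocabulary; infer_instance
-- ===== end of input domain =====

-- B precomputes the set of patterns occurring in the lowered content, then selects tags by set
-- lookup and truncates by slicing; B returns [] for max_suggestions ≤ 0 where A returns one tag (D_).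


-- tag.split("-"): exact, the separator "-" is never empty so split? is always `some`
def pvParts (tag : String) : List String := (PySem.Str.split? tag "-").getD []

-- ===== PORT A =====
-- the for-loop of A, with its early break once len(suggestions) >= max_suggestions
def pvLoopA (cl : String) (maxs : Int) : List String → List String → List String
  | [], acc => acc
  | tag :: rest, acc =>
    if PySem.Str.isIn tag cl || (pvParts tag).any (fun p => PySem.Str.isIn p cl) then
      let acc' := acc ++ [tag]
      if maxs ≤ (acc'.length : Int) then acc' else pvLoopA cl maxs rest acc'
    else pvLoopA cl maxs rest acc

def suggest_tags_from_vocabulary (content : String) (existing_tags : List String) (max_suggestions : Int) : List String :=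
  pvLoopA (PySem.Str.lower content) max_suggestions existing_tags []

-- ===== PORT B =====
-- the set comprehension of B: all patterns (tag and its dash-parts) that occur in cl
def pvHits (cl : String) (tags : List String) : PySem.Set String :=
  tags.foldl (fun s tag =>
    (tag :: pvParts tag).foldl (fun s p => if PySem.Str.isIn p cl then PySem.Set.add s p else s) s)
    PySem.Set.empty

def suggest_tags_from_vocabulary_alt (content : String) (existing_tags : List String) (max_suggestions : Int) : List String :=
  if max_suggestions ≤ 0 then []
  else
    let cl := PySem.Str.lower content
    let hits := pvHits cl existing_tags
    let matched := existing_tags.filter (fun tag =>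
      PySem.Set.contains hits tag || (pvParts tag).any (fun p => PySem.Set.contains hits p))
    PySem.List.slice matched none (some max_suggestions)

-- ===== PRECONDITION & SPEC =====
-- When max_suggestions ≤ 0 and some tag (or one of its dash-parts) occurs in the lowered content,
-- A still returns the first matching tag (its bound is checked only after appending), while B
-- returns [], the intended meaning of asking for at most zero suggestions.
def D_suggest_tags_from_vocabulary (content : String) (existing_tags : List String) (max_suggestions : Int) : Prop :=
  max_suggestions ≤ 0 ∧
  ∃ t ∈ existing_tags,
    t.toList <:+: (PySem.Str.lower content).toList ∨
    ∃ p ∈ (PySem.Str.split? t "-").getD [], p.toList <:+: (PySem.Str.lower content).toList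
instance (content : String) (existing_tags : List String) (max_suggestions : Int) : Decidable (D_suggest_tags_from_vocabulary content existing_tags max_suggestions) := by unfold D_suggest_tags_from_vocabulary; infer_instance

def Spec_suggest_tags_from_vocabulary (content : String) (existing_tags : List String) (max_suggestions : Int) (out : List String) : Prop := ¬ D_suggest_tags_from_vocabulary content existing_tags max_suggestions → out = suggest_tags_from_vocabulary_alt content existing_tags max_suggestions
instance (content : String) (existing_tags : List String) (max_suggestions : Int) (out : List String) : Decidable (Spec_suggest_tags_from_vocabulary content existing_tags max_suggestions out) := by unfold Spec_suggest_tags_from_vocabulary; infer_instance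

def pvDiffWitness_suggest_tags_from_vocabulary : String × List String × Int := ("cat", ["cat"], 0)
def pvDiffWitnessOut_suggest_tags_from_vocabulary : (List String) × (List String) := (["cat"], [])

-- ===== CLAIM (what is proved, stated in full; the proofs are below) =====
def Claim_unchanged_suggest_tags_from_vocabulary : Prop := ∀ (content : String) (existing_tags : List String) (max_suggestions : Int), Dom_suggest_tags_from_vocabulary content existing_tags max_suggestions → Spec_suggest_tags_from_vocabulary content existing_tags max_suggestions (suggest_tags_from_vocabulary content existing_tags max_suggestions)
def Claim_changed_suggest_tags_from_vocabulary : Prop := Dom_suggest_tags_from_vocabulary (pvDiffWitness_suggest_tags_from_vocabulary.1) (pvDiffWitness_suggest_tags_from_vocabulary.2.1) (pvDiffWitness_suggest_tags_from_vocabulary.2.2) ∧ D_suggest_tags_from_vocabulary (pvDiffWitness_suggest_tags_from_vocabulary.1) (pvDiffWitness_suggest_tags_from_vocabulary.2.1) (pvDiffWitness_suggest_tags_from_vocabulary.2.2) ∧ suggest_tags_from_vocabulary (pvDiffWitness_suggest_tags_from_vocabulary.1) (pvDiffWitness_suggest_tags_from_vocabulary.2.1) (pvDiffWitness_suggest_tags_from_vocabulary.2.2)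 = pvDiffWitnessOut_suggest_tags_from_vocabulary.1 ∧ suggest_tags_from_vocabulary_alt (pvDiffWitness_suggest_tags_from_vocabulary.1) (pvDiffWitness_suggest_tags_from_vocabulary.2.1) (pvDiffWitness_suggest_tags_from_vocabulary.2.2) = pvDiffWitnessOut_suggest_tags_from_vocabulary.2 ∧ pvDiffWitnessOut_suggest_tags_from_vocabulary.1 ≠ pvDiffWitnessOut_suggest_tags_from_vocabulary.2
def Claim_exact_suggest_tags_from_vocabulary : Prop := ∀ (content : String) (existing_tags : List String) (max_suggestions : Int), Dom_suggest_tags_from_vocabulary content existing_tags max_suggestions → D_suggest_tags_from_vocabulary content existing_tags max_suggestions → suggest_tags_from_vocabulary content existing_tags max_suggestions ≠ suggest_tags_from_vocabulary_alt content existing_tags max_suggestions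

-- ===== LEMMAS AND PROOFS =====

-- the matching predicate both programs test, written once for the proofs
def pvPred (cl : String) (tag : String) : Bool :=
  PySem.Str.isIn tag cl || (pvParts tag).any (fun p => PySem.Str.isIn p cl)

lemma pvHits_inner_mem (cl : String) (ps : List String) (s : PySem.Set String) (p : String) :
    p ∈ ps.foldl (fun s q => if PySem.Str.isIn q cl then PySem.Set.add s q else s) s ↔
      p ∈ s ∨ (PySem.Str.isIn p cl = true ∧ p ∈ ps) := by
  induction ps generalizing s with
  | nil => simp
  | cons q rest ih =>
    simp only [List.foldl_cons]
    by_cases hq : PySem.Str.isIn q cl = true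
    · rw [if_pos hq, ih]
      simp only [PySem.Set.mem_add, List.mem_cons]
      constructor
      · rintro (⟨h | rfl⟩ | h)
        · exact Or.inl h
        · exact Or.inr ⟨hq, Or.inl rfl⟩
        · exact Or.inr ⟨h.1, Or.inr h.2⟩
      · rintro (h | ⟨hp, rfl | hp'⟩)
        · exact Or.inl (Or.inl h)
        · exact Or.inl (Or.inr rfl)
        · exact Or.inr ⟨hp, hp'⟩
    · rw [if_neg hq, ih]
      simp only [List.mem_cons]
      constructor
      · rintro (h | ⟨hp, hm⟩)
        · exact Or.inl h
        · exact Or.inr ⟨hp, Or.inr hm⟩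
      · rintro (h | ⟨hp, rfl | hm⟩)
        · exact Or.inl h
        · exact absurd hp hq
        · exact Or.inr ⟨hp, hm⟩

lemma pvHits_mem (cl : String) (tags : List String) (p : String) :
    p ∈ pvHits cl tags ↔
      PySem.Str.isIn p cl = true ∧ ∃ t ∈ tags, p = t ∨ p ∈ pvParts t := by
  suffices h : ∀ (s : PySem.Set String),
      p ∈ tags.foldl (fun s tag =>
          (tag :: pvParts tag).foldl (fun s q => if PySem.Str.isIn q cl then PySem.Set.add s q else s) s) s ↔
        p ∈ s ∨ (PySem.Str.isIn p cl = true ∧ ∃ t ∈ tags, p = t ∨ p ∈ pvParts t) by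
    have := h PySem.Set.empty
    simpa [pvHits, PySem.Set.empty] using this
  induction tags with
  | nil => simp
  | cons t rest ih =>
    intro s
    rw [List.foldl_cons, ih, pvHits_inner_mem]
    constructor
    · rintro ((h | ⟨hp, hm⟩) | ⟨hp, t', ht', hm⟩)
      · exact Or.inl h
      · rcases List.mem_cons.mp hm with heq | hm'
        · exact Or.inr ⟨hp, t, List.mem_cons_self .., Or.inl heq⟩
        · exact Or.inr ⟨hp, t, List.mem_cons_self .., Or.inr hm'⟩
      · exact Or.inr ⟨hp, t', List.mem_cons_of_mem _ ht', hm⟩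
    · rintro (h | ⟨hp, t', ht', hm⟩)
      · exact Or.inl (Or.inl h)
      · rcases List.mem_cons.mp ht' with rfl | hrest
        · rcases hm with rfl | hm'
          · exact Or.inl (Or.inr ⟨hp, List.mem_cons_self ..⟩)
          · exact Or.inl (Or.inr ⟨hp, List.mem_cons_of_mem _ hm'⟩)
        · exact Or.inr ⟨hp, t', hrest, hm⟩

lemma pvHits_contains (cl : String) (tags : List String) (t : String) (ht : t ∈ tags)
    (p : String) (hp : p = t ∨ p ∈ pvParts t) :
    PySem.Set.contains (pvHits cl tags) p = PySem.Str.isIn p cl := by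
  have hmem : p ∈ pvHits cl tags ↔ PySem.Str.isIn p cl = true := by
    rw [pvHits_mem]
    exact ⟨fun h => h.1, fun h => ⟨h, t, ht, hp⟩⟩
  have hdec : PySem.Set.contains (pvHits cl tags) p = decide (p ∈ pvHits cl tags) := by
    simp [PySem.Set.contains]
  rw [hdec]
  cases hfin : PySem.Str.isIn p cl with
  | true => exact decide_eq_true (hmem.mpr hfin)
  | false =>
    rw [decide_eq_false_iff_not]
    intro h
    rw [hfin] at hmem
    exact Bool.false_ne_true (hmem.mp h)

-- B's filter test agrees with the direct predicate on members of the vocabulary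
lemma pvFilter_eq (cl : String) (tags : List String) :
    tags.filter (fun tag =>
        PySem.Set.contains (pvHits cl tags) tag ||
        (pvParts tag).any (fun p => PySem.Set.contains (pvHits cl tags) p)) =
      tags.filter (pvPred cl) := by
  apply List.filter_congr
  intro t ht
  unfold pvPred
  rw [pvHits_contains cl tags t ht t (Or.inl rfl)]
  congr 1
  apply PySem.List.any_congr_mem
  intro p hp
  exact pvHits_contains cl tags t ht p (Or.inr hp)

-- A's loop, below the bound, is "take what is still missing" of the filtered list
lemma pvLoopA_eq_take (cl : String) (maxs : Int) (tags : List String) :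
    ∀ acc : List String, (acc.length : Int) < maxs →
      pvLoopA cl maxs tags acc = acc ++ (tags.filter (pvPred cl)).take (maxs - acc.length).toNat := by
  induction tags with
  | nil => intro acc _; simp [pvLoopA]
  | cons t rest ih =>
    intro acc hacc
    by_cases hp : pvPred cl t = true
    · have hp' : (PySem.Str.isIn t cl || (pvParts t).any fun p => PySem.Str.isIn p cl) = true := hp
      simp only [pvLoopA, hp', if_pos]
      by_cases hbr : maxs ≤ ((acc ++ [t]).length : Int)
      · rw [if_pos hbr]
        have hlen : (maxs - acc.length).toNat = 1 := by
          simp only [List.length_append, List.length_cons, List.length_nil] at hbr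
          omega
        rw [List.filter_cons_of_pos hp, hlen, List.take_succ_cons, List.take_zero]
      · rw [if_neg hbr]
        have h1 : (((acc ++ [t]).length : Int)) < maxs := by
          simp only [List.length_append, List.length_cons, List.length_nil] at hbr ⊢
          omega
        rw [ih (acc ++ [t]) h1, List.filter_cons_of_pos hp]
        have h2 : (maxs - acc.length).toNat = (maxs - (acc ++ [t]).length).toNat + 1 := by
          simp only [List.length_append, List.length_cons, List.length_nil]
          omega
        rw [h2, List.take_succ_cons, List.append_assoc]
        rfl
    · have hp' : (PySem.Str.isIn t cl || (pvParts t).any fun p => PySem.Str.isIn p cl) = false :=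
        Bool.eq_false_iff.mpr hp
      simp only [pvLoopA, hp', Bool.false_eq_true, if_false]
      rw [ih acc hacc, List.filter_cons_of_neg hp]

-- with no matching tag the loop leaves the accumulator unchanged
lemma pvLoopA_no_match (cl : String) (maxs : Int) (tags : List String)
    (h : ∀ t ∈ tags, pvPred cl t = false) :
    ∀ acc, pvLoopA cl maxs tags acc = acc := by
  induction tags with
  | nil => intro acc; simp [pvLoopA]
  | cons t rest ih =>
    intro acc
    have hp' : (PySem.Str.isIn t cl || (pvParts t).any fun p => PySem.Str.isIn p cl) = false :=
      h t (List.mem_cons_self ..)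
    simp only [pvLoopA, hp', Bool.false_eq_true, if_false]
    exact ih (fun x hx => h x (List.mem_cons_of_mem _ hx)) acc

-- with a nonpositive bound and a matching tag the loop returns a nonempty list
lemma pvLoopA_ne_nil (cl : String) (maxs : Int) (hm : maxs ≤ 0) (tags : List String)
    (h : ∃ t ∈ tags, pvPred cl t = true) :
    ∀ acc, pvLoopA cl maxs tags acc ≠ [] := by
  induction tags with
  | nil => rcases h with ⟨t, ht, _⟩; simp at ht
  | cons t rest ih =>
    intro acc
    by_cases hp : pvPred cl t = true
    · have hp' : (PySem.Str.isIn t cl || (pvParts t).any fun p => PySem.Str.isIn p cl) = true := hp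
      have hbr : maxs ≤ ((acc ++ [t]).length : Int) := by
        simp only [List.length_append, List.length_cons, List.length_nil]
        omega
      simp only [pvLoopA, hp', if_pos, if_pos hbr]
      simp
    · have hp' : (PySem.Str.isIn t cl || (pvParts t).any fun p => PySem.Str.isIn p cl) = false :=
        Bool.eq_false_iff.mpr hp
      simp only [pvLoopA, hp', Bool.false_eq_true, if_false]
      rcases h with ⟨t', ht', hpt'⟩
      rcases List.mem_cons.mp ht' with rfl | hrest
      · exact absurd hpt' hp
      · exact ih ⟨t', hrest, hpt'⟩ acc

-- the existential in D_ is exactly "some tag passes the matching test"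
lemma pvD_iff (content : String) (existing_tags : List String) :
    (∃ t ∈ existing_tags,
        t.toList <:+: (PySem.Str.lower content).toList ∨
        ∃ p ∈ (PySem.Str.split? t "-").getD [], p.toList <:+: (PySem.Str.lower content).toList) ↔
      existing_tags.any (pvPred (PySem.Str.lower content)) = true := by
  rw [List.any_eq_true]
  apply exists_congr; intro t
  apply and_congr_right'
  simp only [pvPred, pvParts, Bool.or_eq_true, List.any_eq_true, PySem.Str.isIn_iff_infix]

-- ===== VERDICT (by name: the statement is the Claim_ definition above) =====
theorem suggest_tags_from_vocabulary_spec : Claim_unchanged_suggest_tags_from_vocabulary := by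
  intro content existing_tags max_suggestions _ hnD
  unfold suggest_tags_from_vocabulary suggest_tags_from_vocabulary_alt
  set cl := PySem.Str.lower content with hcl
  by_cases hm : max_suggestions ≤ 0
  · rw [if_pos hm]
    have hany : existing_tags.any (pvPred cl) = false := by
      by_contra hb
      exact hnD ⟨hm, (pvD_iff content existing_tags).mpr (by simpa using hb)⟩
    have hno : ∀ t ∈ existing_tags, pvPred cl t = false := by
      intro t ht
      by_contra hb
      rw [Bool.not_eq_false] at hb
      rw [List.any_eq_false] at hany
      exact absurd hb (by simpa using hany t ht)
    exact pvLoopA_no_match cl max_suggestions existing_tags hno []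
  · rw [if_neg hm]
    have hm' : 0 < max_suggestions := by omega
    show pvLoopA cl max_suggestions existing_tags [] =
      PySem.List.slice (existing_tags.filter (fun tag =>
        PySem.Set.contains (pvHits cl existing_tags) tag ||
        (pvParts tag).any (fun p => PySem.Set.contains (pvHits cl existing_tags) p))) none (some max_suggestions)
    rw [pvFilter_eq cl existing_tags,
        PySem.List.slice_to _ (le_of_lt hm'),
        pvLoopA_eq_take cl max_suggestions existing_tags [] (by simpa using hm')]
    simp

theorem suggest_tags_from_vocabulary_changed : Claim_changed_suggest_tags_from_vocabulary := by
  unfold Claim_changed_suggest_tags_from_vocabulary; decide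

theorem suggest_tags_from_vocabulary_tight : Claim_exact_suggest_tags_from_vocabulary := by
  intro content existing_tags max_suggestions _ hD
  rcases hD with ⟨hm, hex⟩
  have hany := (pvD_iff content existing_tags).mp hex
  have hB : suggest_tags_from_vocabulary_alt content existing_tags max_suggestions = [] := by
    unfold suggest_tags_from_vocabulary_alt
    rw [if_pos hm]
  rw [hB]
  unfold suggest_tags_from_vocabulary
  exact pvLoopA_ne_nil (PySem.Str.lower content) max_suggestions hm existing_tags
    (by simpa using hany) []
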